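-- pv_equiv track=rewrite | github.com/cyr0930/impl | etc/bridge_finding_tarjan.py | lowest_post_order
-- ===== SOURCE A (Python) =====
-- def lowest_post_order(S, root, po):
--     def l_rec(root, seen, l):
--         low = po[root]
--         for node in S[root]:
--             if S[root][node] == 'green':
--                 if node not in seen:
--                     seen.add(node)
--                     l_rec(node, seen, l)
--                     low = min(low, l[node])
--                     seen.remove(node)
--             else:
--                 low = min(low, po[node])
--         l[root] = low
--         return l
--     return l_rec(root, {root}, {})
-- ===== SOURCE B (Python) =====
-- def lowest_post_order(S, root, po):
--     # Iterative DFS with an explicit stack of frames (node, running low, child iterator),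
--     # reproducing A's recursion order, seen-set backtracking and last-write dict semantics.
--     l = {}
--     seen = {root}
--     stack = [(root, po[root], iter(S[root].items()))]
--     while stack:
--         node, low, it = stack[-1]
--         advanced = False
--         for child, color in it:
--             if color == 'green':
--                 if child not in seen:
--                     seen.add(child)
--                     stack[-1] = (node, low, it)
--                     stack.append((child, po[child], iter(S[child].items())))
--                     advanced = True
--                     break
--             else:
--                 low = min(low, po[child])
--         if advanced:
--             continue
--         l[node] = low
--         stack.pop()
--         seen.remove(node)
--         if stack:
--             pnode, plow, pit = stack[-1]
--             stack[-1] = (pnode, min(plow, l[node]), pit)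
--     return l
-- ===== Notes on version B (the rewrite author's own statement) =====
-- stated objective: alternative
-- what changed: The recursive DFS with a mutated seen set is re-decomposed as an iterative DFS over an explicit stack of (node, running low, child iterator) frames, folding child lows into the parent on pop.
import Mathlib
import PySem

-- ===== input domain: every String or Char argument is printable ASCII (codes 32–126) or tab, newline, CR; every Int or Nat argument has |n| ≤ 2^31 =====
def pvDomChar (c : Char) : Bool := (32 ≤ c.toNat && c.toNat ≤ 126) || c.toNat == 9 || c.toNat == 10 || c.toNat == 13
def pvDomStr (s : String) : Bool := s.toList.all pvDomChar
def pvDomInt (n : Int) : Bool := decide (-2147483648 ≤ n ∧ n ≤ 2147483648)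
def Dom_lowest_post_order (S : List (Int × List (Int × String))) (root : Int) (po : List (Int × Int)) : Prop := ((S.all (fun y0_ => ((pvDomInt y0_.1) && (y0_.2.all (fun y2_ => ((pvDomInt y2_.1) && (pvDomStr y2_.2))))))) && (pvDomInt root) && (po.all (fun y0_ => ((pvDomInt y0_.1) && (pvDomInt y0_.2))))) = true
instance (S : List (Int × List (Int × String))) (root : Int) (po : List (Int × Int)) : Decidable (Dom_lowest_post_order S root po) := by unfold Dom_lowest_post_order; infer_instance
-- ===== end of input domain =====

-- B rewrites A's recursive DFS as an iterative DFS over an explicit stack of frames (same visit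
-- order, same seen-set backtracking, same last-write dict semantics); objective: alternative
-- decomposition, not faster. Equivalence is about the return value (neither mutates its arguments).

-- ===== PORT A =====
-- Python dicts S, po are received as association lists and rebuilt as PySem.Dicts once, up front.
def pvSDict (S : List (Int × List (Int × String))) : PySem.Dict Int (PySem.Dict Int String) :=
  PySem.Dict.ofList (S.map (fun p => (p.1, PySem.Dict.ofList p.2)))

-- l_rec, with a fuel argument bounding recursion DEPTH (a totality device only: with the fuel the
-- entry point passes, the 0 branch is unreachable on every input where the Python returns).
-- Python's in-place seen.add(node) … seen.remove(node) around the recursive call is modeled by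
-- passing (seen.add node) to the call and continuing the loop with the unchanged seen — exact,
-- because the remove undoes the add of a node that was not in seen.
def pvLrecA (S : PySem.Dict Int (PySem.Dict Int String)) (po : PySem.Dict Int Int) :
    Nat → Int → PySem.Set Int → PySem.Dict Int Int → PySem.Dict Int Int
  | 0, _, _, l => l
  | f + 1, v, seen, l =>
    let st := ((S.getD v PySem.Dict.empty).items).foldl
      (fun (st : Int × PySem.Dict Int Int) (nc : Int × String) =>
        if nc.2 == "green" then
          if PySem.Set.contains seen nc.1 then st
          else
            let l' := pvLrecA S po f nc.1 (PySem.Set.add seen nc.1) st.2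
            (min st.1 (PySem.Dict.getD l' nc.1 0), l')
        else (min st.1 (PySem.Dict.getD po nc.1 0), st.2))
      (PySem.Dict.getD po v 0, l)
    PySem.Dict.insert st.2 v st.1

def lowest_post_order (S : List (Int × List (Int × String))) (root : Int) (po : List (Int × Int)) : List (Int × Int) :=
  (pvLrecA (pvSDict S) (PySem.Dict.ofList po) (S.length + 1) root
    (PySem.Set.ofList [root]) PySem.Dict.empty).items

-- ===== PORT B =====
-- A stack frame of Source B: (node, fuel, running low, remaining children). The fuel component bounds
-- the depth of the simulated recursion exactly as in port A (totality device; the Python has none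
-- and terminates because path nodes are distinct). seen.remove(node) is ported as Set.discard
-- (exact: the node is always in seen there).
def pvMaxAdj (S : PySem.Dict Int (PySem.Dict Int String)) : Nat :=
  S.items.foldl (fun a p => max a p.2.items.length) 0

def pvStackW (B : Nat) (frames : List (Int × Nat × Int × List (Int × String))) : Nat :=
  (frames.map (fun fr => fr.2.2.2.length * B ^ fr.2.1 + 1)).sum

theorem pvFoldl_max_init {α : Type} (f : α → Nat) :
    ∀ (l : List α) (a : Nat), a ≤ l.foldl (fun a y => max a (f y)) a := by
  intro l
  induction l with
  | nil => simp
  | cons h t ih => intro a; exact le_trans (le_max_left a (f h)) (ih _)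

theorem pvLe_foldl_max {α : Type} (f : α → Nat) :
    ∀ (l : List α) (a : Nat), ∀ x ∈ l, f x ≤ l.foldl (fun a y => max a (f y)) a := by
  intro l
  induction l with
  | nil => intro a x hx; cases hx
  | cons h t ih =>
    intro a x hx
    simp only [List.mem_cons] at hx
    rcases hx with hx | hx
    · subst hx
      exact le_trans (le_max_right a (f x)) (pvFoldl_max_init f t _)
    · exact ih _ x hx

theorem pvAdjLen_le (S : PySem.Dict Int (PySem.Dict Int String)) (m : Int) :
    ((S.getD m PySem.Dict.empty).items).length ≤ pvMaxAdj S := by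
  rcases h : S.get? m with _ | d
  · rw [PySem.Dict.getD_eq_get?_getD, h]
    simp [PySem.Dict.empty, pvMaxAdj]
  · rw [PySem.Dict.getD_eq_get?_getD, h]
    exact pvLe_foldl_max (fun p => p.2.items.length) S.items 0 (m, d)
      (PySem.Dict.mem_items_of_get?_eq_some S h)

theorem pvDecPop2 (B : Nat) (fr : Int × Nat × Int × List (Int × String))
    (pr : Int × Nat × Int × List (Int × String))
    (r : List (Int × Nat × Int × List (Int × String))) (plow' : Int) :
    pvStackW B ((pr.1, pr.2.1, plow', pr.2.2.2) :: r) < pvStackW B (fr :: pr :: r) := by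
  simp only [pvStackW, List.map, List.sum_cons]
  omega

theorem pvDecSkip2 (B : Nat) (hB : 1 ≤ B) (fr : Int × Nat × Int × List (Int × String))
    (nc : Int × String) (adj' : List (Int × String)) (hadj : fr.2.2.2 = nc :: adj') (low' : Int)
    (rest : List (Int × Nat × Int × List (Int × String))) :
    pvStackW B ((fr.1, fr.2.1, low', adj') :: rest) < pvStackW B (fr :: rest) := by
  simp only [pvStackW, List.map, List.sum_cons, hadj, List.length_cons]
  have h1 : 1 ≤ B ^ fr.2.1 := Nat.one_le_pow _ _ hB
  have : adj'.length * B ^ fr.2.1 < (adj'.length + 1) * B ^ fr.2.1 := by nlinarith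
  omega

theorem pvDecPush2 (B : Nat) (fr : Int × Nat × Int × List (Int × String)) (nc : Int × String)
    (adj' adjm : List (Int × String)) (hadj : fr.2.2.2 = nc :: adj') (low2 : Int)
    (rest : List (Int × Nat × Int × List (Int × String)))
    (hfv : 2 ≤ fr.2.1) (hlen : adjm.length + 2 ≤ B) :
    pvStackW B ((nc.1, fr.2.1 - 1, low2, adjm) :: (fr.1, fr.2.1, fr.2.2.1, adj') :: rest)
      < pvStackW B (fr :: rest) := by
  simp only [pvStackW, List.map, List.sum_cons, hadj, List.length_cons]
  obtain ⟨k, hk⟩ : ∃ k, fr.2.1 = k + 2 := ⟨fr.2.1 - 2, by omega⟩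
  rw [hk]
  have hpow : B ^ (k + 2) = B ^ (k + 2 - 1) * B := by norm_num [pow_succ]
  have h1 : 1 ≤ B ^ (k + 2 - 1) := Nat.one_le_pow _ _ (by omega)
  have hkey : adjm.length * B ^ (k + 2 - 1) + 1 < B ^ (k + 2) := by
    rw [hpow]
    have := Nat.mul_le_mul_right (B ^ (k + 2 - 1)) hlen
    nlinarith
  have hexp : (adj'.length + 1) * B ^ (k + 2)
      = adj'.length * B ^ (k + 2) + B ^ (k + 2) := by ring
  omega

def pvRunB (S : PySem.Dict Int (PySem.Dict Int String)) (po : PySem.Dict Int Int) :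
    List (Int × Nat × Int × List (Int × String)) → PySem.Set Int → PySem.Dict Int Int →
    PySem.Dict Int Int
  | [], _, l => l
  | fr :: rest, seen, l =>
    match hadj : fr.2.2.2 with
    | [] =>
      -- children exhausted: l[node] = low, pop, restore seen, fold into parent's low
      let l' := PySem.Dict.insert l fr.1 fr.2.2.1
      let seen' := PySem.Set.discard seen fr.1
      match rest with
      | [] => l'
      | pr :: r =>
        pvRunB S po
          ((pr.1, pr.2.1, min pr.2.2.1 (PySem.Dict.getD l' fr.1 0), pr.2.2.2) :: r) seen' l'
    | nc :: adj' =>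
      if nc.2 == "green" then
        if PySem.Set.contains seen nc.1 then
          pvRunB S po ((fr.1, fr.2.1, fr.2.2.1, adj') :: rest) seen l
        else if _h : fr.2.1 ≤ 1 then
          -- fuel exhausted (unreachable with the entry point's fuel wherever the Python returns):
          -- the simulated child call returns l unchanged, as in port A's 0 branch
          pvRunB S po
            ((fr.1, fr.2.1, min fr.2.2.1 (PySem.Dict.getD l nc.1 0), adj') :: rest) seen l
        else
          pvRunB S po
            ((nc.1, fr.2.1 - 1, PySem.Dict.getD po nc.1 0, (S.getD nc.1 PySem.Dict.empty).items) ::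
              (fr.1, fr.2.1, fr.2.2.1, adj') :: rest)
            (PySem.Set.add seen nc.1) l
      else
        pvRunB S po
          ((fr.1, fr.2.1, min fr.2.2.1 (PySem.Dict.getD po nc.1 0), adj') :: rest) seen l
termination_by frames _ _ => pvStackW (pvMaxAdj S + 2) frames
decreasing_by
  · exact pvDecPop2 _ fr pr r _
  · exact pvDecSkip2 _ (by omega) fr nc adj' hadj _ rest
  · exact pvDecSkip2 _ (by omega) fr nc adj' hadj _ rest
  · exact pvDecPush2 _ fr nc adj' _ hadj _ rest (by omega) (by have := pvAdjLen_le S nc.1; omega)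
  · exact pvDecSkip2 _ (by omega) fr nc adj' hadj _ rest

def lowest_post_order_alt (S : List (Int × List (Int × String))) (root : Int) (po : List (Int × Int)) : List (Int × Int) :=
  let Sd := pvSDict S
  let pod := PySem.Dict.ofList po
  (pvRunB Sd pod
    [(root, S.length + 1, PySem.Dict.getD pod root 0, (Sd.getD root PySem.Dict.empty).items)]
    (PySem.Set.ofList [root]) PySem.Dict.empty).items

-- ===== PRECONDITION & SPEC =====
-- Pre_ = exactly the inputs on which the Python A returns (no KeyError): every node the DFS visits
-- (= green-edge reachability from root, computed by plain saturation, not by the port's recursion)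
-- is a key of S and of po, and its non-green neighbours are keys of po.
def pvGreenStep (Sd : PySem.Dict Int (PySem.Dict Int String)) (R : PySem.Set Int) : PySem.Set Int :=
  R.foldl
    (fun acc v =>
      ((Sd.getD v PySem.Dict.empty).items).foldl
        (fun acc2 nc => if nc.2 == "green" then PySem.Set.add acc2 nc.1 else acc2) acc)
    R

def pvGreenReach (S : List (Int × List (Int × String))) (root : Int) : PySem.Set Int :=
  (List.range (S.length + (S.map (fun p => p.2.length)).sum + 1)).foldl
    (fun R _ => pvGreenStep (pvSDict S) R) (PySem.Set.ofList [root])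

def Pre_lowest_post_order (S : List (Int × List (Int × String))) (root : Int) (po : List (Int × Int)) : Prop :=
  ((pvGreenReach S root).all (fun v =>
      (pvSDict S).contains v && (PySem.Dict.ofList po).contains v &&
        (((pvSDict S).getD v PySem.Dict.empty).items).all
          (fun nc => nc.2 == "green" || (PySem.Dict.ofList po).contains nc.1))) = true

instance (S : List (Int × List (Int × String))) (root : Int) (po : List (Int × Int)) : Decidable (Pre_lowest_post_order S root po) := by unfold Pre_lowest_post_order; infer_instance

def pvWitness_lowest_post_order : (List (Int × List (Int × String))) × Int × (List (Int × Int)) :=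
  ([(0, [(1, "green"), (2, "red")]), (1, [(0, "green")]), (2, [])], 0, [(0, 5), (1, 3), (2, 4)])

def Spec_lowest_post_order (S : List (Int × List (Int × String))) (root : Int) (po : List (Int × Int)) (out : List (Int × Int)) : Prop := out = lowest_post_order_alt S root po
instance (S : List (Int × List (Int × String))) (root : Int) (po : List (Int × Int)) (out : List (Int × Int)) : Decidable (Spec_lowest_post_order S root po out) := by unfold Spec_lowest_post_order; infer_instance

-- ===== CLAIM (what is proved, stated in full; the proofs are below) =====
def Claim_equal_lowest_post_order : Prop := ∀ (S : List (Int × List (Int × String))) (root : Int) (po : List (Int × Int)), Dom_lowest_post_order S root po → Pre_lowest_post_order S root po → Spec_lowest_post_order S root po (lowest_post_order S root po)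

-- ===== LEMMAS AND PROOFS =====

-- the body of pvLrecA's fold, as a named function (definitionally equal to the inline lambda)
def pvStepA (S : PySem.Dict Int (PySem.Dict Int String)) (po : PySem.Dict Int Int) (f : Nat)
    (seen : PySem.Set Int) (st : Int × PySem.Dict Int Int) (nc : Int × String) :
    Int × PySem.Dict Int Int :=
  if nc.2 == "green" then
    if PySem.Set.contains seen nc.1 then st
    else
      let l' := pvLrecA S po f nc.1 (PySem.Set.add seen nc.1) st.2
      (min st.1 (PySem.Dict.getD l' nc.1 0), l')
  else (min st.1 (PySem.Dict.getD po nc.1 0), st.2)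

theorem pvLrecA_succ (S : PySem.Dict Int (PySem.Dict Int String)) (po : PySem.Dict Int Int)
    (f : Nat) (v : Int) (seen : PySem.Set Int) (l : PySem.Dict Int Int) :
    pvLrecA S po (f + 1) v seen l =
      (let st := ((S.getD v PySem.Dict.empty).items).foldl (pvStepA S po f seen)
        (PySem.Dict.getD po v 0, l)
      PySem.Dict.insert st.2 v st.1) := rfl

-- what the machine does after finishing a frame for node v with result dict l'
def pvContB (S : PySem.Dict Int (PySem.Dict Int String)) (po : PySem.Dict Int Int)
    (rest : List (Int × Nat × Int × List (Int × String))) (seen' : PySem.Set Int) (v : Int)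
    (l' : PySem.Dict Int Int) : PySem.Dict Int Int :=
  match rest with
  | [] => l'
  | (p, fp, plow, padj) :: r =>
    pvRunB S po ((p, fp, min plow (PySem.Dict.getD l' v 0), padj) :: r) seen' l'

theorem pvDiscard_add (seen : PySem.Set Int) (m : Int) (h : PySem.Set.contains seen m = false) :
    PySem.Set.discard (PySem.Set.add seen m) m = seen := by
  have hni : m ∉ seen := by
    simp only [PySem.Set.contains] at h
    simpa using h
  simp only [PySem.Set.add, PySem.Set.contains]
  rw [if_neg (by simpa using hni)]
  simp only [PySem.Set.discard, List.filter_append]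
  rw [List.filter_eq_self.mpr (fun b hb => by
    simpa using fun hbm : b = m => hni (hbm ▸ hb))]
  simp

-- the machine processes one frame exactly like one call of pvLrecA, then resumes the parent
theorem pvRunB_frame (S : PySem.Dict Int (PySem.Dict Int String)) (po : PySem.Dict Int Int) :
    ∀ (f : Nat) (adj : List (Int × String)) (low : Int) (l : PySem.Dict Int Int)
      (rest : List (Int × Nat × Int × List (Int × String))) (seen : PySem.Set Int) (v : Int),
      pvRunB S po ((v, f + 1, low, adj) :: rest) seen l =
        pvContB S po rest (PySem.Set.discard seen v) v
          (PySem.Dict.insert (adj.foldl (pvStepA S po f seen) (low, l)).2 v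
            (adj.foldl (pvStepA S po f seen) (low, l)).1) := by
  intro f
  induction f with
  | zero =>
    intro adj
    induction adj with
    | nil =>
      intro low l rest seen v
      cases rest with
      | nil =>
        rw [pvRunB.eq_def]; dsimp only; simp [pvContB]
      | cons p r =>
        rcases p with ⟨p1, p2, p3, p4⟩
        rw [pvRunB.eq_def]; dsimp only; simp [pvContB]
    | cons hd tl ih =>
      rcases hd with ⟨m, c⟩
      intro low l rest seen v
      by_cases hc : (c == "green") = true
      · by_cases hs : PySem.Set.contains seen m = true
        · -- green edge to an already-seen node: skipped on both sides
          have hL : pvRunB S po ((v, (0:Nat) + 1, low, (m, c) :: tl) :: rest) seen l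
              = pvRunB S po ((v, (0:Nat) + 1, low, tl) :: rest) seen l := by
            rw [pvRunB.eq_def]; dsimp only; rw [if_pos hc, if_pos hs]
          rw [hL, ih low l rest seen v, List.foldl_cons,
            show pvStepA S po 0 seen (low, l) (m, c) = (low, l) from by
              simp only [pvStepA]; rw [if_pos hc, if_pos hs]]
        · -- green edge, new node, but child fuel would be 0: both sides fold getD l m 0
          have hL : pvRunB S po ((v, (0:Nat) + 1, low, (m, c) :: tl) :: rest) seen l
              = pvRunB S po ((v, (0:Nat) + 1, min low (PySem.Dict.getD l m 0), tl) :: rest) seen l := by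
            rw [pvRunB.eq_def]; dsimp only
            rw [if_pos hc, if_neg hs, dif_pos (by omega : (0:Nat) + 1 ≤ 1)]
          rw [hL, ih (min low (PySem.Dict.getD l m 0)) l rest seen v, List.foldl_cons,
            show pvStepA S po 0 seen (low, l) (m, c)
                = (min low (PySem.Dict.getD l m 0), l) from by
              simp only [pvStepA]; rw [if_pos hc, if_neg hs]; rfl]
      · -- non-green edge: fold po lookup on both sides
        have hL : pvRunB S po ((v, (0:Nat) + 1, low, (m, c) :: tl) :: rest) seen l
            = pvRunB S po ((v, (0:Nat) + 1, min low (PySem.Dict.getD po m 0), tl) :: rest) seen l := by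
          rw [pvRunB.eq_def]; dsimp only; rw [if_neg hc]
        rw [hL, ih (min low (PySem.Dict.getD po m 0)) l rest seen v, List.foldl_cons,
          show pvStepA S po 0 seen (low, l) (m, c)
              = (min low (PySem.Dict.getD po m 0), l) from by
            simp only [pvStepA]; rw [if_neg hc]]
  | succ f ihf =>
    intro adj
    induction adj with
    | nil =>
      intro low l rest seen v
      cases rest with
      | nil =>
        rw [pvRunB.eq_def]; dsimp only; simp [pvContB]
      | cons p r =>
        rcases p with ⟨p1, p2, p3, p4⟩
        rw [pvRunB.eq_def]; dsimp only; simp [pvContB]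
    | cons hd tl ih =>
      rcases hd with ⟨m, c⟩
      intro low l rest seen v
      by_cases hc : (c == "green") = true
      · by_cases hs : PySem.Set.contains seen m = true
        · have hL : pvRunB S po ((v, f + 1 + 1, low, (m, c) :: tl) :: rest) seen l
              = pvRunB S po ((v, f + 1 + 1, low, tl) :: rest) seen l := by
            rw [pvRunB.eq_def]; dsimp only; rw [if_pos hc, if_pos hs]
          rw [hL, ih low l rest seen v, List.foldl_cons,
            show pvStepA S po (f + 1) seen (low, l) (m, c) = (low, l) from by
              simp only [pvStepA]; rw [if_pos hc, if_pos hs]]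
        · -- push: run the child frame like one pvLrecA call, then resume the parent
          have hL : pvRunB S po ((v, f + 1 + 1, low, (m, c) :: tl) :: rest) seen l
              = pvRunB S po
                  ((m, f + 1, PySem.Dict.getD po m 0, (S.getD m PySem.Dict.empty).items) ::
                    (v, f + 1 + 1, low, tl) :: rest)
                  (PySem.Set.add seen m) l := by
            rw [pvRunB.eq_def]; dsimp only
            rw [if_pos hc, if_neg hs, dif_neg (by omega : ¬ (f + 1 + 1 ≤ 1))]
            norm_num
          rw [hL, ihf ((S.getD m PySem.Dict.empty).items) (PySem.Dict.getD po m 0) l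
              ((v, f + 1 + 1, low, tl) :: rest) (PySem.Set.add seen m) m]
          rw [pvDiscard_add seen m (by simpa using hs)]
          rw [show PySem.Dict.insert
                (((S.getD m PySem.Dict.empty).items).foldl
                  (pvStepA S po f (PySem.Set.add seen m))
                  (PySem.Dict.getD po m 0, l)).2 m
                (((S.getD m PySem.Dict.empty).items).foldl
                  (pvStepA S po f (PySem.Set.add seen m))
                  (PySem.Dict.getD po m 0, l)).1
              = pvLrecA S po (f + 1) m (PySem.Set.add seen m) l from
            (pvLrecA_succ S po f m (PySem.Set.add seen m) l).symm]
          rw [show pvContB S po ((v, f + 1 + 1, low, tl) :: rest) seen m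
                (pvLrecA S po (f + 1) m (PySem.Set.add seen m) l)
              = pvRunB S po
                  ((v, f + 1 + 1,
                    min low
                      (PySem.Dict.getD (pvLrecA S po (f + 1) m (PySem.Set.add seen m) l) m 0),
                    tl) :: rest) seen
                  (pvLrecA S po (f + 1) m (PySem.Set.add seen m) l) from rfl]
          rw [ih (min low
              (PySem.Dict.getD (pvLrecA S po (f + 1) m (PySem.Set.add seen m) l) m 0))
              (pvLrecA S po (f + 1) m (PySem.Set.add seen m) l) rest seen v]
          rw [List.foldl_cons,
            show pvStepA S po (f + 1) seen (low, l) (m, c)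
                = (min low
                    (PySem.Dict.getD (pvLrecA S po (f + 1) m (PySem.Set.add seen m) l) m 0),
                  pvLrecA S po (f + 1) m (PySem.Set.add seen m) l) from by
              simp only [pvStepA]; rw [if_pos hc, if_neg hs]]
      · have hL : pvRunB S po ((v, f + 1 + 1, low, (m, c) :: tl) :: rest) seen l
            = pvRunB S po ((v, f + 1 + 1, min low (PySem.Dict.getD po m 0), tl) :: rest) seen l := by
          rw [pvRunB.eq_def]; dsimp only; rw [if_neg hc]
        rw [hL, ih (min low (PySem.Dict.getD po m 0)) l rest seen v, List.foldl_cons,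
          show pvStepA S po (f + 1) seen (low, l) (m, c)
              = (min low (PySem.Dict.getD po m 0), l) from by
            simp only [pvStepA]; rw [if_neg hc]]

-- ===== VERDICT (by name: the statement is the Claim_ definition above) =====
theorem lowest_post_order_spec : Claim_equal_lowest_post_order := by
  intro S root po _hDom _hPre
  unfold Spec_lowest_post_order lowest_post_order lowest_post_order_alt
  dsimp only
  rw [pvRunB_frame (pvSDict S) (PySem.Dict.ofList po) S.length]
  rw [pvLrecA_succ]
  rfl
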